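-- pv_equiv track=rewrite | github.com/ag502/algorithm | Problem/BOJ_3300_무어 기계/main.py | parsing_machine
-- ===== SOURCE A (Python) =====
-- def parsing_machine(machine):
--     new_machine = ["^"]
--     for char in machine:
--         if char == "(":
--             new_machine.append("(?:")
--         elif char == "_":
--             new_machine.append("([A-Z])")
--         else:
--             new_machine.append(char)
--     new_machine.append("$")
--     return "".join(new_machine)
-- ===== SOURCE B (Python) =====
-- def parsing_machine(machine):
--     segments = ["(?:".join(piece.split("(")) for piece in machine.split("_")]
--     return "^" + "([A-Z])".join(segments) + "$"
-- ===== Notes on version B (the rewrite author's own statement) =====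
-- stated objective: faster
-- what changed: B segments the string instead of scanning characters one by one: it splits on '_' into pieces, rewrites each piece's parentheses by splitting on '(' and joining with '(?:', then joins the pieces with '([A-Z])' between the anchors; no per-character Python loop or branch remains.
import Mathlib
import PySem

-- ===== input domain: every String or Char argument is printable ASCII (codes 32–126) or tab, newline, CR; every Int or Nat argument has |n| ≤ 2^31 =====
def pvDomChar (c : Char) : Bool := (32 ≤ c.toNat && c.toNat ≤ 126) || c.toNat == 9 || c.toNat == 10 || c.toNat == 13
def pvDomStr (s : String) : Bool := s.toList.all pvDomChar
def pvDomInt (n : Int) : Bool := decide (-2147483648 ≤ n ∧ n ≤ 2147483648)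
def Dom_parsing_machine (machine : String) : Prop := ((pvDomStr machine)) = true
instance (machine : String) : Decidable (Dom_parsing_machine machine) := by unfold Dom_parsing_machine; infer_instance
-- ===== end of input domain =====

-- B replaces A's per-character loop by segmentation: split on '_', rewrite each piece's
-- '(' by split/join, join the pieces with the class pattern (faster in a timing run: no per-character Python loop).

-- ===== PORT A =====
def parsing_machine (machine : String) : String :=
  let new_machine : List String :=
    machine.toList.foldl
      (fun acc char =>
        if char = '(' then acc ++ ["(?:"]
        else if char = '_' then acc ++ ["([A-Z])"]
        else acc ++ [String.ofList [char]])
      ["^"]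
  PySem.Str.join "" (new_machine ++ ["$"])

-- ===== PORT B =====
-- ported on the Chars (List Char) side: piece.split("(") → Chars.splitOn, sep.join → Chars.join
def parsing_machine_alt (machine : String) : String :=
  let segments : List (List Char) :=
    (PySem.Chars.splitOn machine.toList "_".toList).map
      (fun piece => PySem.Chars.join "(?:".toList (PySem.Chars.splitOn piece "(".toList))
  String.ofList ("^".toList ++ PySem.Chars.join "([A-Z])".toList segments ++ "$".toList)

-- ===== PRECONDITION & SPEC =====
def Spec_parsing_machine (machine : String) (out : String) : Prop := out = parsing_machine_alt machine
instance (machine : String) (out : String) : Decidable (Spec_parsing_machine machine out) := by unfold Spec_parsing_machine; infer_instance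

-- ===== CLAIM (what is proved, stated in full; the proofs are below) =====
def Claim_equal_parsing_machine : Prop := ∀ (machine : String), Dom_parsing_machine machine → Spec_parsing_machine machine (parsing_machine machine)

-- ===== LEMMAS AND PROOFS =====

-- the common normal form both programs reduce to: one substitution map per character
def pvMap (c : Char) : List Char :=
  if c = '(' then "(?:".toList else if c = '_' then "([A-Z])".toList else [c]

-- structural form of Chars.splitOn for a single-character separator
def chSplit (o : Char) (pre : List Char) : List Char → List (List Char)
  | [] => [pre]
  | c :: t => if c = o then pre :: chSplit o [] t else chSplit o (pre ++ [c]) t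

lemma splitGo (o : Char) :
    ∀ (fuel : Nat) (l cur : List Char) (acc : List (List Char)), l.length ≤ fuel →
      PySem.Chars.splitOn.go [o] fuel l cur acc = acc.reverse ++ chSplit o cur.reverse l := by
  intro fuel
  induction fuel with
  | zero =>
    intro l cur acc h
    have : l = [] := List.eq_nil_of_length_eq_zero (Nat.le_zero.mp h)
    subst this
    simp [PySem.Chars.splitOn.go, chSplit]
  | succ n ih =>
    intro l cur acc h
    cases l with
    | nil => simp [PySem.Chars.splitOn.go, chSplit]
    | cons c t =>
      by_cases hc : c = o
      · subst hc
        have hp : [c].isPrefixOf (c :: t) = true := by simp [List.isPrefixOf]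
        have ht : t.length ≤ n := by simpa using h
        simp [PySem.Chars.splitOn.go, hp, ih t [] _ ht, chSplit]
      · have hp : [o].isPrefixOf (c :: t) = false := by
          simp [List.isPrefixOf]
          intro h'; exact absurd h'.symm hc
        have ht : t.length ≤ n := by simpa using h
        simp [PySem.Chars.splitOn.go, hp, ih t (c :: cur) _ ht, chSplit, hc]

lemma splitOn_single (l : List Char) (o : Char) :
    PySem.Chars.splitOn l [o] = chSplit o [] l := by
  simpa using splitGo o (l.length + 1) l [] [] (by omega)

lemma chSplit_ne_nil (o : Char) (pre l : List Char) : chSplit o pre l ≠ [] := by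
  induction l generalizing pre with
  | nil => simp [chSplit]
  | cons c t ih =>
    by_cases hc : c = o <;> simp [chSplit, hc, ih]

lemma join_cons (sep p : List Char) (ps : List (List Char)) (h : ps ≠ []) :
    PySem.Chars.join sep (p :: ps) = p ++ sep ++ PySem.Chars.join sep ps := by
  cases ps with
  | nil => exact absurd rfl h
  | cons q qs => simp [PySem.Chars.join, List.intercalate]

lemma joinMap (g : Char → List Char) (o : Char) (rep : List Char) :
    ∀ (l pre : List Char),
      PySem.Chars.join rep ((chSplit o pre l).map (fun seg => seg.flatMap g))
        = pre.flatMap g ++ l.flatMap (fun d => if d = o then rep else g d) := by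
  intro l
  induction l with
  | nil => intro pre; simp [chSplit, PySem.Chars.join, List.intercalate]
  | cons c t ih =>
    intro pre
    by_cases hc : c = o
    · subst hc
      have hne : (chSplit c [] t).map (fun seg => seg.flatMap g) ≠ [] := by
        simp [chSplit_ne_nil]
      rw [chSplit, if_pos rfl, List.map_cons, join_cons _ _ _ hne, ih []]
      simp
    · rw [chSplit, if_neg hc, ih (pre ++ [c])]
      simp [hc]

-- A's loop as a map
lemma foldA (l : List Char) :
    ∀ (init : List String),
      l.foldl (fun acc char =>
        if char = '(' then acc ++ ["(?:"]
        else if char = '_' then acc ++ ["([A-Z])"]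
        else acc ++ [String.ofList [char]]) init
      = init ++ l.map (fun c =>
          if c = '(' then "(?:" else if c = '_' then "([A-Z])" else String.ofList [c]) := by
  induction l with
  | nil => intro init; simp
  | cons c t ih =>
    intro init
    by_cases h1 : c = '('
    · simp [List.foldl_cons, h1, ih]
    · by_cases h2 : c = '_' <;> simp [List.foldl_cons, h1, h2, ih]

lemma join_nil_flatten (parts : List (List Char)) :
    PySem.Chars.join [] parts = parts.flatten := by
  induction parts with
  | nil => simp [PySem.Chars.join, List.intercalate]
  | cons p ps ih =>
    cases ps with
    | nil => simp [PySem.Chars.join, List.intercalate]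
    | cons q qs =>
      simp only [PySem.Chars.join, List.intercalate, List.intersperse] at *
      simpa using ih

lemma toList_hStr (c : Char) :
    (if c = '(' then "(?:" else if c = '_' then "([A-Z])" else String.ofList [c]).toList
      = pvMap c := by
  by_cases h1 : c = '(' <;> by_cases h2 : c = '_' <;> simp [pvMap, h1, h2]

-- B's segmentation collapses to the same per-character map
lemma altChars (l : List Char) :
    PySem.Chars.join "([A-Z])".toList
      ((PySem.Chars.splitOn l "_".toList).map
        (fun piece => PySem.Chars.join "(?:".toList (PySem.Chars.splitOn piece "(".toList)))
      = l.flatMap pvMap := by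
  have inner : ∀ piece : List Char,
      PySem.Chars.join "(?:".toList (PySem.Chars.splitOn piece "(".toList)
        = piece.flatMap (fun d => if d = '(' then "(?:".toList else [d]) := by
    intro piece
    have := joinMap (fun c => [c]) '(' "(?:".toList piece []
    simpa [show ("(" : String).toList = ['('] from rfl, splitOn_single] using this
  rw [show ("_" : String).toList = ['_'] from rfl, splitOn_single]
  rw [List.map_congr_left (fun piece _ => inner piece)]
  have := joinMap (fun d => if d = '(' then "(?:".toList else [d]) '_' "([A-Z])".toList l []
  rw [this]
  apply List.flatMap_congr
  intro c _
  by_cases h1 : c = '_'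
  · simp [pvMap, h1]
  · by_cases h2 : c = '(' <;> simp [pvMap, h1, h2]

-- ===== VERDICT (by name: the statement is the Claim_ definition above) =====
theorem parsing_machine_spec : Claim_equal_parsing_machine := by
  intro machine _
  unfold Spec_parsing_machine
  apply String.toList_inj.mp
  show (parsing_machine machine).toList = (parsing_machine_alt machine).toList
  rw [parsing_machine, parsing_machine_alt]
  simp only [PySem.Str.toList_join]
  rw [show ("" : String).toList = [] from rfl, join_nil_flatten]
  rw [foldA]
  simp only [List.map_append, List.flatten_append, List.map_map]
  rw [List.map_congr_left (l := machine.toList)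
      (f := String.toList ∘ fun c => if c = '(' then "(?:" else if c = '_' then "([A-Z])" else String.ofList [c])
      (g := pvMap) (fun c _ => by simpa using toList_hStr c)]
  rw [String.toList_ofList, altChars]
  simp [List.flatMap]
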